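-- pv_equiv track=rewrite | github.com/whotookmylogin/FF-Domination | backend/src/news/perplexity_source.py | _calculate_urgency_from_text
-- ===== SOURCE A (Python) =====
-- def _calculate_urgency_from_text(text: str) -> int:
--     """
--     Calculate urgency based on text content.
--
--     Args:
--         text: News text
--
--     Returns:
--         Urgency score (1-5)
--     """
--     text_lower = text.lower()
--
--     # High urgency keywords
--     if any(word in text_lower for word in ["breaking", "injury", "out", "doubtful", "surgery", "ir", "injured reserve"]):
--         return 5
--     elif any(word in text_lower for word in ["questionable", "limited", "trade", "waiver"]):
--         return 4
--     elif any(word in text_lower for word in ["expected", "probable", "update", "report"]):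
--         return 3
--     elif any(word in text_lower for word in ["practice", "returning", "cleared"]):
--         return 2
--     else:
--         return 1
-- ===== SOURCE B (Python) =====
-- def _calculate_urgency_from_text(text: str) -> int:
--     """Keyword-tier table + one running-max pass (instead of the ordered if/elif cascade)."""
--     keyword_scores = {
--         "breaking": 5, "injury": 5, "out": 5, "doubtful": 5,
--         "surgery": 5, "ir": 5, "injured reserve": 5,
--         "questionable": 4, "limited": 4, "trade": 4, "waiver": 4,
--         "expected": 3, "probable": 3, "update": 3, "report": 3,
--         "practice": 2, "returning": 2, "cleared": 2,
--     }
--     text_lower = text.lower()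
--     urgency = 1
--     for keyword, score in keyword_scores.items():
--         if keyword in text_lower and score > urgency:
--             urgency = score
--     return urgency
-- ===== Notes on version B (the rewrite author's own statement) =====
-- stated objective: alternative
-- what changed: Replaced the four ordered any()-cascade branches by a keyword->score table scanned once with a running maximum (highest matching tier wins, default 1).
import Mathlib
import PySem

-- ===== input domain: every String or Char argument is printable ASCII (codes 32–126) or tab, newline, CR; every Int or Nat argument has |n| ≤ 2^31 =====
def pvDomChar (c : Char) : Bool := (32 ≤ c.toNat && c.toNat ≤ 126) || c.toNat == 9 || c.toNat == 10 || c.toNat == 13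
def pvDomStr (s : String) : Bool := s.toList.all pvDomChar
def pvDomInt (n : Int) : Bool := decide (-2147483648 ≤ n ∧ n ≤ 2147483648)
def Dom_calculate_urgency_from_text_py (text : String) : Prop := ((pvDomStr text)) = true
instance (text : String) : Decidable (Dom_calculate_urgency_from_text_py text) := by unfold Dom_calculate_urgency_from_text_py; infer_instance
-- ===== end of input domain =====

-- B replaces A's ordered if/elif any()-cascade by a keyword→tier table scanned once with a running maximum (alternative decomposition, same cost).


-- ===== PORT A =====
def calculate_urgency_from_text_py (text : String) : Int :=
  let text_lower := PySem.Str.lower text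
  if (["breaking", "injury", "out", "doubtful", "surgery", "ir", "injured reserve"].any
        (fun word => PySem.Str.isIn word text_lower)) = true then 5
  else if (["questionable", "limited", "trade", "waiver"].any
        (fun word => PySem.Str.isIn word text_lower)) = true then 4
  else if (["expected", "probable", "update", "report"].any
        (fun word => PySem.Str.isIn word text_lower)) = true then 3
  else if (["practice", "returning", "cleared"].any
        (fun word => PySem.Str.isIn word text_lower)) = true then 2
  else 1

-- ===== PORT B =====
def calculate_urgency_from_text_py_alt (text : String) : Int :=
  let keyword_scores : List (String × Int) :=
    [("breaking", 5), ("injury", 5), ("out", 5), ("doubtful", 5),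
     ("surgery", 5), ("ir", 5), ("injured reserve", 5),
     ("questionable", 4), ("limited", 4), ("trade", 4), ("waiver", 4),
     ("expected", 3), ("probable", 3), ("update", 3), ("report", 3),
     ("practice", 2), ("returning", 2), ("cleared", 2)]
  let text_lower := PySem.Str.lower text
  keyword_scores.foldl
    (fun urgency p => if PySem.Str.isIn p.1 text_lower = true ∧ p.2 > urgency then p.2 else urgency) 1

-- ===== PRECONDITION & SPEC =====
def Spec_calculate_urgency_from_text_py (text : String) (out : Int) : Prop := out = calculate_urgency_from_text_py_alt text
instance (text : String) (out : Int) : Decidable (Spec_calculate_urgency_from_text_py text out) := by unfold Spec_calculate_urgency_from_text_py; infer_instance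

-- ===== CLAIM (what is proved, stated in full; the proofs are below) =====
def Claim_equal_calculate_urgency_from_text_py : Prop := ∀ (text : String), Dom_calculate_urgency_from_text_py text → Spec_calculate_urgency_from_text_py text (calculate_urgency_from_text_py text)

-- ===== LEMMAS AND PROOFS =====

-- One tier of B's running-max loop (an abstract match predicate c, one score s),
-- folded over the keywords of that tier, equals a single conditional on "some keyword matches".
theorem pv_tier_foldl (c : String → Bool) (s : Int) (kws : List String) (best : Int) :
    (kws.map (fun k => (k, s))).foldl
        (fun urgency p => if c p.1 = true ∧ p.2 > urgency then p.2 else urgency) best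
      = if (kws.any c) = true ∧ s > best then s else best := by
  induction kws generalizing best with
  | nil => simp
  | cons k kws ih =>
    simp only [List.map_cons, List.foldl_cons, List.any_cons, ih, Bool.or_eq_true]
    by_cases hc : c k = true
    · by_cases hs : s > best
      · simp [hc, hs]
      · simp [hc, hs]
    · simp [hc]

set_option maxHeartbeats 1000000 in
theorem calculate_urgency_equiv (text : String) :
    calculate_urgency_from_text_py text = calculate_urgency_from_text_py_alt text := by
  unfold calculate_urgency_from_text_py calculate_urgency_from_text_py_alt
  have hsplit :
      ([("breaking", (5:Int)), ("injury", 5), ("out", 5), ("doubtful", 5),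
        ("surgery", 5), ("ir", 5), ("injured reserve", 5),
        ("questionable", 4), ("limited", 4), ("trade", 4), ("waiver", 4),
        ("expected", 3), ("probable", 3), ("update", 3), ("report", 3),
        ("practice", 2), ("returning", 2), ("cleared", 2)] : List (String × Int))
      = (["breaking", "injury", "out", "doubtful", "surgery", "ir", "injured reserve"].map (fun k => (k, (5:Int))))
        ++ (["questionable", "limited", "trade", "waiver"].map (fun k => (k, (4:Int))))
        ++ (["expected", "probable", "update", "report"].map (fun k => (k, (3:Int))))
        ++ (["practice", "returning", "cleared"].map (fun k => (k, (2:Int)))) := by rfl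
  rw [hsplit]
  rw [List.foldl_append, List.foldl_append, List.foldl_append]
  rw [pv_tier_foldl (fun k => PySem.Str.isIn k (PySem.Str.lower text)),
      pv_tier_foldl (fun k => PySem.Str.isIn k (PySem.Str.lower text)),
      pv_tier_foldl (fun k => PySem.Str.isIn k (PySem.Str.lower text)),
      pv_tier_foldl (fun k => PySem.Str.isIn k (PySem.Str.lower text))]
  cases h5 : (["breaking", "injury", "out", "doubtful", "surgery", "ir", "injured reserve"].any
      (fun k => PySem.Str.isIn k (PySem.Str.lower text))) <;>
  cases h4 : (["questionable", "limited", "trade", "waiver"].any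
      (fun k => PySem.Str.isIn k (PySem.Str.lower text))) <;>
  cases h3 : (["expected", "probable", "update", "report"].any
      (fun k => PySem.Str.isIn k (PySem.Str.lower text))) <;>
  cases h2 : (["practice", "returning", "cleared"].any
      (fun k => PySem.Str.isIn k (PySem.Str.lower text))) <;>
  simp only [h5, h4, h3, h2] <;> norm_num

-- ===== VERDICT (by name: the statement is the Claim_ definition above) =====
set_option maxHeartbeats 1000000 in
theorem calculate_urgency_from_text_py_spec : Claim_equal_calculate_urgency_from_text_py := by
  intro text _
  unfold Spec_calculate_urgency_from_text_py
  exact calculate_urgency_equiv text
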